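-- pv_equiv track=rewrite | github.com/seolbbb/Re-View | src/fusion/renderer.py | _truncate_lines
-- ===== SOURCE A (Python) =====
-- from typing import Any, Dict, List, Optional
--
-- def _truncate_lines(lines: List[str], max_chars: int) -> str:
--     """텍스트가 최대 길이를 초과하면 잘라내고 생략 표시를 추가한다."""
--     if max_chars <= 0:
--         return "\n".join(lines)
--     joined = "\n".join(lines)
--     if len(joined) <= max_chars:
--         return joined
--     suffix = "...(이하 생략)"
--     truncated = lines[:]
--     while truncated and len("\n".join(truncated + [suffix])) > max_chars:
--         truncated.pop()
--     if not truncated: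
--         return suffix[:max_chars]
--     truncated.append(suffix)
--     return "\n".join(truncated)
-- ===== SOURCE B (Python) =====
-- from typing import List
--
-- def _truncate_lines(lines: List[str], max_chars: int) -> str:
--     """O(n) re-implementation: one forward pass over cumulative lengths instead of repeated joins."""
--     if max_chars <= 0:
--         return "\n".join(lines)
--     joined = "\n".join(lines)
--     if len(joined) <= max_chars:
--         return joined
--     suffix = "...(이하 생략)"
--     budget = max_chars - len(suffix)
--     total = 0
--     k = 0
--     for line in lines:
--         total += len(line) + 1  # the line plus the "\n" before the suffix
--         if total > budget:
--             break
--         k += 1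
--     if k == 0:
--         return suffix[:max_chars]
--     return "\n".join(lines[:k]) + "\n" + suffix
-- ===== Notes on version B (the rewrite author's own statement) =====
-- stated objective: faster
-- what changed: Replaces the pop-and-rejoin while loop (which re-joins the whole remaining list on every iteration) with one forward pass over cumulative line lengths that finds the number of fitting lines, followed by a single join.
import Mathlib
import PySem

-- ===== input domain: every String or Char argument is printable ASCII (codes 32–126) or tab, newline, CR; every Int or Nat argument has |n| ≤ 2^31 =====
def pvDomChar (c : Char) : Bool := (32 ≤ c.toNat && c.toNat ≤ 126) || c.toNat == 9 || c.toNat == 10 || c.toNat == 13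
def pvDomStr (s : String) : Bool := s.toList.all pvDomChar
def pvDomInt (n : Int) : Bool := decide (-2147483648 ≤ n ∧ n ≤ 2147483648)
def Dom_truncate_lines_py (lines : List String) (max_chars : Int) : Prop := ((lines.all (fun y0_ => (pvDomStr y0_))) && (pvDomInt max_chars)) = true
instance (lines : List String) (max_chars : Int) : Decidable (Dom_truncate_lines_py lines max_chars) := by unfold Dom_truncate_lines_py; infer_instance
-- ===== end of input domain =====

-- B replaces A's pop-and-rejoin while loop by a single forward pass over cumulative
-- line lengths (find the fit count, then join once): O(n) instead of O(n^2); proved equal.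


-- ===== PORT A =====
def pvSuffix : String := "...(이하 생략)"

-- A's while loop: pop the last line while the suffixed join is still too long.
def pvALoop (max_chars : Int) : List String → List String
  | [] => []
  | t :: ts =>
    if PySem.Str.len (PySem.Str.join "\n" ((t :: ts) ++ [pvSuffix])) > max_chars then
      pvALoop max_chars (t :: ts).dropLast
    else t :: ts
  termination_by l => l.length
  decreasing_by simp

def truncate_lines_py (lines : List String) (max_chars : Int) : String :=
  if max_chars ≤ 0 then PySem.Str.join "\n" lines
  else
    let joined := PySem.Str.join "\n" lines
    if PySem.Str.len joined ≤ max_chars then joined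
    else
      let truncated := pvALoop max_chars lines
      if truncated = [] then PySem.Str.slice pvSuffix none (some max_chars)
      else PySem.Str.join "\n" (truncated ++ [pvSuffix])

-- ===== PORT B =====
-- B's forward pass: count the lines whose cumulative length (each line + one "\n") fits the budget.
def pvBScan (budget : Int) : List String → Int → Nat → Nat
  | [], _, k => k
  | l :: rest, total, k =>
    if total + PySem.Str.len l + 1 > budget then k
    else pvBScan budget rest (total + PySem.Str.len l + 1) (k + 1)

def truncate_lines_py_alt (lines : List String) (max_chars : Int) : String :=
  if max_chars ≤ 0 then PySem.Str.join "\n" lines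
  else
    let joined := PySem.Str.join "\n" lines
    if PySem.Str.len joined ≤ max_chars then joined
    else
      let budget := max_chars - PySem.Str.len pvSuffix
      let k := pvBScan budget lines 0 0
      if k = 0 then PySem.Str.slice pvSuffix none (some max_chars)
      else PySem.Str.join "\n" (lines.take k) ++ "\n" ++ pvSuffix

-- ===== PRECONDITION & SPEC =====
def Spec_truncate_lines_py (lines : List String) (max_chars : Int) (out : String) : Prop := out = truncate_lines_py_alt lines max_chars
instance (lines : List String) (max_chars : Int) (out : String) : Decidable (Spec_truncate_lines_py lines max_chars out) := by unfold Spec_truncate_lines_py; infer_instance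

-- ===== CLAIM (what is proved, stated in full; the proofs are below) =====
def Claim_equal_truncate_lines_py : Prop := ∀ (lines : List String) (max_chars : Int), Dom_truncate_lines_py lines max_chars → Spec_truncate_lines_py lines max_chars (truncate_lines_py lines max_chars)

-- ===== LEMMAS AND PROOFS =====

-- cumulative cost of the first j lines: their lengths plus one separator each
def pvF (lines : List String) (j : Nat) : Int :=
  ((lines.take j).map PySem.Str.len).sum + j

set_option maxRecDepth 8192 in
theorem pvSuffix_len : PySem.Str.len pvSuffix = 10 := by decide

theorem pvF_zero (lines : List String) : pvF lines 0 = 0 := by simp [pvF]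

theorem pvF_succ (lines : List String) (j : Nat) (h : j < lines.length) :
    pvF lines (j + 1) = pvF lines j + PySem.Str.len lines[j] + 1 := by
  simp only [pvF, List.take_succ_eq_append_getElem h, List.map_append, List.sum_append,
    List.map_cons, List.map_nil, List.sum_cons, List.sum_nil, Nat.cast_add, Nat.cast_one]
  ring

theorem pvLen_nonneg (s : String) : 0 ≤ PySem.Str.len s := by
  rw [PySem.Str.len_eq]; positivity

theorem pvF_mono (lines : List String) {i j : Nat} (hij : i ≤ j) (hj : j ≤ lines.length) :
    pvF lines i ≤ pvF lines j := by
  induction j with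
  | zero => simp_all
  | succ m ih =>
    rcases Nat.lt_or_ge i (m+1) with hlt | hge
    · have h1 : pvF lines i ≤ pvF lines m := ih (by omega) (by omega)
      have h2 := pvF_succ lines m (by omega)
      have h3 := pvLen_nonneg lines[m]
      omega
    · have : i = m + 1 := by omega
      simp [this]

-- length of a join of a nonempty list by a one-character separator
theorem pvChars_join_len (sep : List Char) (hsep : sep.length = 1) :
    ∀ (ps : List (List Char)), ps ≠ [] →
      (PySem.Chars.join sep ps).length = (ps.map List.length).sum + (ps.length - 1) := by
  intro ps
  induction ps with
  | nil => simp
  | cons p rest ih =>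
    intro _
    cases rest with
    | nil => simp [PySem.Chars.join_singleton]
    | cons q r =>
      rw [PySem.Chars.join_cons_cons]
      have := ih (by simp)
      simp only [List.length_append, List.map_cons, List.sum_cons, List.length_cons, hsep] at *
      omega

theorem pvSum_cast (xs : List String) :
    ((xs.map PySem.Str.len).sum : Int) = (((xs.map (fun s => s.toList.length)).sum : Nat) : Int) := by
  induction xs with
  | nil => simp
  | cons a t ih => simp [PySem.Str.len_eq, ih]

theorem pvStr_join_len (xs : List String) (h : xs ≠ []) :
    PySem.Str.len (PySem.Str.join "\n" xs) =
      (xs.map PySem.Str.len).sum + (xs.length : Int) - 1 := by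
  rw [PySem.Str.len_eq]
  simp only [PySem.Str.join, String.toList_ofList]
  rw [pvChars_join_len ("\n".toList) (by decide) (xs.map String.toList) (by simpa using h)]
  rw [pvSum_cast]
  have hx : 1 ≤ xs.length := by cases xs <;> simp_all
  have hmm : (xs.map String.toList).map List.length = xs.map (fun s => s.toList.length) := by
    simp [Function.comp]
  rw [hmm]
  simp only [List.length_map]
  push_cast
  omega

-- cost of the candidate "first j lines + suffix"
theorem pvCost_eq (lines : List String) (j : Nat) (hj : j ≤ lines.length) :
    PySem.Str.len (PySem.Str.join "\n" (lines.take j ++ [pvSuffix])) = pvF lines j + 10 := by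
  rw [pvStr_join_len _ (by simp)]
  simp only [List.map_append, List.sum_append, List.length_append, List.map_cons, List.map_nil,
    List.sum_cons, List.sum_nil, List.length_cons, List.length_nil, List.length_take,
    pvSuffix_len, pvF]
  push_cast
  omega

-- dropping the last element of a j-prefix gives the (j-1)-prefix
theorem pvDropLast_take (lines : List String) (j : Nat) (h : j ≤ lines.length) :
    (lines.take j).dropLast = lines.take (j - 1) := by
  rw [List.dropLast_eq_take, List.take_take, List.length_take]
  congr 1
  omega

-- what the forward scan computes
theorem pvBScan_spec (lines : List String) (budget : Int) :
    ∀ (ds : List String) (k : Nat), k ≤ lines.length → ds = lines.drop k →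
      k ≤ pvBScan budget ds (pvF lines k) k ∧
      pvBScan budget ds (pvF lines k) k ≤ lines.length ∧
      (k < pvBScan budget ds (pvF lines k) k → pvF lines (pvBScan budget ds (pvF lines k) k) ≤ budget) ∧
      (pvBScan budget ds (pvF lines k) k < lines.length → budget < pvF lines (pvBScan budget ds (pvF lines k) k + 1)) := by
  intro ds
  induction ds with
  | nil =>
    intro k hk hd
    have : lines.length ≤ k := by
      by_contra hlt
      have := List.drop_eq_nil_iff.mp hd.symm
      omega
    have hkn : k = lines.length := by omega
    simp [pvBScan, hkn]
  | cons l rest ih =>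
    intro k hk hd
    have hklt : k < lines.length := by
      by_contra hge
      have : lines.drop k = [] := List.drop_eq_nil_iff.mpr (by omega)
      rw [this] at hd
      exact (List.cons_ne_nil l rest) hd
    rw [List.drop_eq_getElem_cons hklt] at hd
    obtain ⟨hl, hrest⟩ := List.cons_eq_cons.mp hd
    have hstep : pvF lines k + PySem.Str.len l + 1 = pvF lines (k + 1) := by
      rw [hl, ← pvF_succ lines k hklt]
    simp only [pvBScan]
    by_cases hc : pvF lines k + PySem.Str.len l + 1 > budget
    · simp only [if_pos hc]
      refine ⟨le_refl _, by omega, by omega, ?_⟩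
      intro _
      omega
    · simp only [if_neg hc]
      rw [hstep]
      have := ih (k + 1) (by omega) hrest
      have hfit : pvF lines (k + 1) ≤ budget := by omega
      refine ⟨by omega, this.2.1, ?_, this.2.2.2⟩
      intro hlt2
      rcases Nat.lt_or_ge (k + 1) (pvBScan budget rest (pvF lines (k+1)) (k+1)) with h2 | h2
      · exact this.2.2.1 h2
      · have : pvBScan budget rest (pvF lines (k+1)) (k+1) = k + 1 := by omega
        rw [this]
        exact hfit

theorem pvTake_ne_nil (lines : List String) (K : Nat) (hK : 0 < K) (hn : 0 < lines.length) :
    lines.take K ≠ [] := by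
  intro h
  rcases List.take_eq_nil_iff.mp h with h' | h'
  · omega
  · subst h'
    simp at hn

-- A's loop, started on any prefix at or above the fit count, lands on the fit-count prefix
theorem pvALoop_take (lines : List String) (max_chars : Int) (K : Nat)
    (hKn : K ≤ lines.length)
    (hfit : 0 < K → pvF lines K ≤ max_chars - 10)
    (hstop : K < lines.length → max_chars - 10 < pvF lines (K + 1)) :
    ∀ j, K ≤ j → j ≤ lines.length → pvALoop max_chars (lines.take j) = lines.take K := by
  intro j
  induction j using Nat.strong_induction_on with
  | h j ih =>
    intro hKj hjn
    rcases Nat.eq_or_lt_of_le hKj with heq | hlt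
    · -- j = K : the loop condition fails (or the list is empty) and the prefix is returned
      subst heq
      rcases Nat.eq_zero_or_pos K with h0 | hpos
      · simp [h0, pvALoop]
      · obtain ⟨t, ts, hts⟩ := List.exists_cons_of_ne_nil
          (pvTake_ne_nil lines K hpos (by omega))
        have := hfit hpos
        rw [hts, pvALoop, ← hts, pvCost_eq lines K hjn, if_neg (by omega)]
    · -- j > K : the condition holds, pop and recurse
      have hK1 : K < lines.length := by omega
      have hgt : max_chars - 10 < pvF lines j :=
        lt_of_lt_of_le (hstop hK1) (pvF_mono lines (by omega) hjn)
      obtain ⟨t, ts, hts⟩ := List.exists_cons_of_ne_nil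
        (pvTake_ne_nil lines j (by omega) (by omega))
      rw [hts, pvALoop, ← hts, pvCost_eq lines j hjn, if_pos (by omega),
        pvDropLast_take lines j hjn]
      exact ih (j - 1) (by omega) (by omega) (by omega)

theorem pvChars_join_append_singleton (sep : List Char) :
    ∀ (ps : List (List Char)) (q : List Char), ps ≠ [] →
      PySem.Chars.join sep (ps ++ [q]) = PySem.Chars.join sep ps ++ sep ++ q := by
  intro ps
  induction ps with
  | nil => simp
  | cons p rest ihp =>
    intro q _
    cases rest with
    | nil => simp [PySem.Chars.join_singleton, PySem.Chars.join_cons_cons]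
    | cons a b =>
      simp only [List.cons_append]
      rw [PySem.Chars.join_cons_cons, PySem.Chars.join_cons_cons]
      rw [show a :: (b ++ [q]) = (a :: b) ++ [q] from rfl, ihp q (by simp)]
      simp

theorem pvJoin_append_singleton (xs : List String) (s : String) (h : xs ≠ []) :
    PySem.Str.join "\n" (xs ++ [s]) = PySem.Str.join "\n" xs ++ "\n" ++ s := by
  apply String.toList_inj.mp
  simp only [PySem.Str.join, String.toList_append, String.toList_ofList, List.map_append,
    List.map_cons, List.map_nil]
  exact pvChars_join_append_singleton ("\n".toList) (xs.map String.toList) s.toList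
    (by simpa using h)

-- ===== VERDICT (by name: the statement is the Claim_ definition above) =====
theorem truncate_lines_py_spec : Claim_equal_truncate_lines_py := by
  intro lines max_chars _
  unfold Spec_truncate_lines_py
  simp only [truncate_lines_py, truncate_lines_py_alt]
  by_cases h1 : max_chars ≤ 0
  · simp only [if_pos h1]
  · simp only [if_neg h1]
    by_cases h2 : PySem.Str.len (PySem.Str.join "\n" lines) ≤ max_chars
    · simp only [if_pos h2]
    · simp only [if_neg h2]
      have hne : lines ≠ [] := by
        intro hnil
        apply h2
        rw [hnil]
        have : PySem.Str.len (PySem.Str.join "\n" ([] : List String)) = 0 := by decide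
        omega
      rw [pvSuffix_len]
      set budget := max_chars - 10 with hb
      set K := pvBScan budget lines 0 0 with hKdef
      have hspec := pvBScan_spec lines budget lines 0 (by omega) (by simp)
      rw [pvF_zero] at hspec
      rw [← hKdef] at hspec
      obtain ⟨-, hKn, hfit, hstop⟩ := hspec
      have haloop : pvALoop max_chars lines = lines.take K := by
        have := pvALoop_take lines max_chars K hKn
          (fun h => by simpa [hb] using hfit h)
          (fun h => by simpa [hb] using hstop h)
          lines.length (by omega) (by omega)
        simpa using this
      rw [haloop]
      by_cases hK0 : K = 0
      · simp [hK0]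
      · rw [if_neg (pvTake_ne_nil lines K (by omega) (List.length_pos_iff.mpr hne)), if_neg hK0]
        exact pvJoin_append_singleton _ _ (pvTake_ne_nil lines K (by omega) (List.length_pos_iff.mpr hne))
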